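-- pv_equiv track=rewrite | github.com/llien30/STEP2020 | Day1/homework1.py | make_sorted_dict
-- ===== SOURCE A (Python) =====
-- from typing import List, Tuple
--
-- def make_sorted_dict(dictionary: List[str]) -> List[Tuple[str, str]]:
--     new_dictionary = []
--
--     # それぞれの単語について文字をソートして新しい辞書に追加
--     for word in dictionary:
--
--         # 全て小文字へ変換
--         lower_word = word.lower()
--
--         # 文字列のソート
--         sorted_word = "".join(sorted(list(lower_word)))
--         new_dictionary.append((sorted_word, word))
--
--     # 辞書のソート
--     # 組み込み関数のsort(Timsort)を使う(O(nlogn))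
--     sorted_dictionary = sorted(new_dictionary, key=lambda x: x[0])
--
--     return sorted_dictionary
-- ===== SOURCE B (Python) =====
-- from typing import List, Tuple
--
-- def make_sorted_dict(dictionary: List[str]) -> List[Tuple[str, str]]:
--     # Group-by-key instead of a global stable sort: key every word, collect the
--     # distinct keys, sort only the keys, then emit each key's bucket in input order.
--     keyed = [("".join(sorted(word.lower())), word) for word in dictionary]
--     keys = sorted(set(k for (k, _) in keyed))
--     return [pair for key in keys for pair in keyed if pair[0] == key]
-- ===== Notes on version B (the rewrite author's own statement) =====
-- stated objective: alternative
-- what changed: Instead of building a flat keyed list and stably sorting all n pairs, B groups words by their sorted-lowercased key: it sorts only the distinct keys and then emits each key's bucket in input order (stability for free).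
import Mathlib
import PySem

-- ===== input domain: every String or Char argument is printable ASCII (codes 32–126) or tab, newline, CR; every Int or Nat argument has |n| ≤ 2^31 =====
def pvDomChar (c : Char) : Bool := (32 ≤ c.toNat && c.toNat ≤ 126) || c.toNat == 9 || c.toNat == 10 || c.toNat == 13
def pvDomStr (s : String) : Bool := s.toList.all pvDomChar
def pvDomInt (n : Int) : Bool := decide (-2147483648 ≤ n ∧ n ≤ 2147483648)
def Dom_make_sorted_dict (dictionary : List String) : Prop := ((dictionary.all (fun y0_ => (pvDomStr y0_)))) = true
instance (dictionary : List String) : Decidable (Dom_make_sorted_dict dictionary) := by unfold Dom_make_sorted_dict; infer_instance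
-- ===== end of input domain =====

-- B replaces A's global stable sort of all keyed pairs by group-by-key: sort only the
-- distinct keys and emit each key's bucket in input order; same return value (alternative, no speed claim).

-- shared per-word computation: "".join(sorted(word.lower())) (the identical expression appears in Source A and Source B)
def pvKey (word : String) : String :=
  String.ofList (PySem.List.sorted (PySem.Str.lower word).toList (fun c => c) false)

-- ===== PORT A =====
def make_sorted_dict (dictionary : List String) : List (String × String) :=
  let new_dictionary := dictionary.foldl (fun acc word => acc ++ [(pvKey word, word)]) []
  PySem.List.sorted new_dictionary (fun x => x.1) false

-- ===== PORT B =====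
def make_sorted_dict_alt (dictionary : List String) : List (String × String) :=
  let keyed := dictionary.map (fun word => (pvKey word, word))
  let keys := PySem.List.sorted (PySem.Set.ofList (keyed.map (fun p => p.1))) (fun k => k) false
  keys.flatMap (fun key => keyed.filter (fun p => p.1 == key))

-- ===== PRECONDITION & SPEC =====
def Spec_make_sorted_dict (dictionary : List String) (out : List (String × String)) : Prop := out = make_sorted_dict_alt dictionary
instance (dictionary : List String) (out : List (String × String)) : Decidable (Spec_make_sorted_dict dictionary out) := by unfold Spec_make_sorted_dict; infer_instance

-- ===== CLAIM (what is proved, stated in full; the proofs are below) =====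
def Claim_equal_make_sorted_dict : Prop := ∀ (dictionary : List String), Dom_make_sorted_dict dictionary → Spec_make_sorted_dict dictionary (make_sorted_dict dictionary)

-- ===== LEMMAS AND PROOFS =====

theorem pv_insertBy_skip {α : Type} (bf : α → α → Bool) (x : α) (ys zs : List α)
    (h : ∀ y ∈ ys, bf x y = false) :
    PySem.List.insertBy bf x (ys ++ zs) = ys ++ PySem.List.insertBy bf x zs := by
  induction ys with
  | nil => simp
  | cons y t ih =>
    have hy : bf x y = false := h y (by simp)
    have ih' := ih (fun z hz => h z (List.mem_cons_of_mem _ hz))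
    rw [List.cons_append]
    cases ht : t ++ zs with
    | nil => simp [PySem.List.insertBy, hy, ht] at ih' ⊢; exact ih'
    | cons b u => simp [PySem.List.insertBy, hy, ht] at ih' ⊢; exact ih'

theorem pv_insertBy_front {α : Type} (bf : α → α → Bool) (x : α) (ys : List α)
    (h : ∀ y ∈ ys, bf x y = true) :
    PySem.List.insertBy bf x ys = x :: ys := by
  cases ys with
  | nil => rfl
  | cons y t => simp [PySem.List.insertBy, h y (by simp)]

theorem pv_mem_filter_fst (l : List (String × String)) (k : String) (p : String × String)
    (hp : p ∈ l.filter (fun q => q.1 == k)) : p.1 = k := by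
  have := List.of_mem_filter hp
  simpa using this

theorem pv_mem_flatMap_fst (ks : List String) (l : List (String × String)) (p : String × String)
    (hp : p ∈ ks.flatMap (fun k => l.filter (fun q => q.1 == k))) : p.1 ∈ ks := by
  rcases List.mem_flatMap.1 hp with ⟨k, hk, hpk⟩
  rw [pv_mem_filter_fst l k p hpk]; exact hk

theorem pv_flatMap_congr {α β : Type} (ks : List α) (f g : α → List β)
    (h : ∀ k ∈ ks, f k = g k) : ks.flatMap f = ks.flatMap g := by
  induction ks with
  | nil => rfl
  | cons k t ih =>
    simp only [List.flatMap_cons, h k (by simp), ih (fun a ha => h a (by simp [ha]))]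

theorem pv_filter_append_x (l : List (String × String)) (x : String × String) (k : String) :
    (l ++ [x]).filter (fun p => p.1 == k) =
      l.filter (fun p => p.1 == k) ++ (if x.1 = k then [x] else []) := by
  rw [List.filter_append]
  by_cases h : x.1 = k <;> simp [h]

theorem pv_insert_mem (x : String × String) (l : List (String × String)) :
    ∀ ks : List String, ks.Pairwise (· < ·) → x.1 ∈ ks →
    PySem.List.insertBy (fun a b => decide (a.1 < b.1)) x
        (ks.flatMap (fun k => l.filter (fun p => p.1 == k))) =
      ks.flatMap (fun k => (l ++ [x]).filter (fun p => p.1 == k)) := by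
  intro ks
  induction ks with
  | nil => intro _ h; simp at h
  | cons k t ih =>
    intro hpw hmem
    have hklt := (List.pairwise_cons.1 hpw).1
    have hpw' := (List.pairwise_cons.1 hpw).2
    rcases List.mem_cons.1 hmem with hxk | hxt
    · -- x.1 = k : walk through bucket k, then insert at the front of the rest
      have hskip : ∀ y ∈ l.filter (fun p => p.1 == k),
          (fun a b : String × String => decide (a.1 < b.1)) x y = false := by
        intro y hy
        have hyk := pv_mem_filter_fst l k y hy
        show decide (x.1 < y.1) = false
        rw [hyk, hxk]
        exact decide_eq_false (lt_irrefl k)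
      have hfront : ∀ y ∈ t.flatMap (fun k' => l.filter (fun p => p.1 == k')),
          (fun a b : String × String => decide (a.1 < b.1)) x y = true := by
        intro y hy
        have hyt := pv_mem_flatMap_fst t l y hy
        have : k < y.1 := hklt _ hyt
        show decide (x.1 < y.1) = true
        rw [hxk]
        exact decide_eq_true this
      rw [List.flatMap_cons, pv_insertBy_skip _ _ _ _ hskip,
        pv_insertBy_front _ _ _ hfront, List.flatMap_cons,
        pv_filter_append_x l x k, if_pos hxk]
      rw [pv_flatMap_congr t (fun k' => (l ++ [x]).filter (fun p => p.1 == k'))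
            (fun k' => l.filter (fun p => p.1 == k'))
            (by
              intro k' hk'
              show (l ++ [x]).filter (fun p => p.1 == k') = l.filter (fun p => p.1 == k')
              rw [pv_filter_append_x, if_neg, List.append_nil]
              rw [hxk]; exact ne_of_lt (hklt _ hk'))]
      simp
    · -- x.1 ∈ t : skip bucket k entirely and recurse
      have hkx : k < x.1 := hklt _ hxt
      have hskip : ∀ y ∈ l.filter (fun p => p.1 == k),
          (fun a b : String × String => decide (a.1 < b.1)) x y = false := by
        intro y hy
        have hyk := pv_mem_filter_fst l k y hy
        show decide (x.1 < y.1) = false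
        rw [hyk]
        exact decide_eq_false (not_lt.2 (le_of_lt hkx))
      rw [List.flatMap_cons, pv_insertBy_skip _ _ _ _ hskip, ih hpw' hxt,
        List.flatMap_cons, pv_filter_append_x l x k, if_neg (by exact ne_of_gt hkx),
        List.append_nil]

theorem pv_insert_notmem (x : String × String) (l : List (String × String)) :
    ∀ ks : List String, ks.Pairwise (· < ·) → x.1 ∉ ks →
    l.filter (fun p => p.1 == x.1) = [] →
    PySem.List.insertBy (fun a b => decide (a.1 < b.1)) x
        (ks.flatMap (fun k => l.filter (fun p => p.1 == k))) =
      (PySem.List.insertBy (fun a b : String => decide (a < b)) x.1 ks).flatMap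
        (fun k => (l ++ [x]).filter (fun p => p.1 == k)) := by
  intro ks
  induction ks with
  | nil =>
    intro _ _ hl
    simp [PySem.List.insertBy, hl]
  | cons k t ih =>
    intro hpw hnm hl
    have hklt := (List.pairwise_cons.1 hpw).1
    have hpw' := (List.pairwise_cons.1 hpw).2
    have hne : x.1 ≠ k := fun h => hnm (by simp [h])
    rcases lt_or_gt_of_ne hne with hlt | hgt
    · -- x.1 < k : x goes to the very front
      have hfront : ∀ y ∈ (k :: t).flatMap (fun k' => l.filter (fun p => p.1 == k')),
          (fun a b : String × String => decide (a.1 < b.1)) x y = true := by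
        intro y hy
        have hyt := pv_mem_flatMap_fst (k :: t) l y hy
        show decide (x.1 < y.1) = true
        rcases List.mem_cons.1 hyt with h1 | h2
        · rw [h1]; exact decide_eq_true hlt
        · exact decide_eq_true (lt_trans hlt (hklt _ h2))
      rw [pv_insertBy_front _ _ _ hfront]
      have hins : PySem.List.insertBy (fun a b : String => decide (a < b)) x.1 (k :: t)
          = x.1 :: k :: t := by
        simp [PySem.List.insertBy, hlt]
      rw [hins]
      simp only [List.flatMap_cons]
      rw [pv_filter_append_x l x x.1, if_pos rfl, hl, List.nil_append,
        pv_filter_append_x l x k, if_neg hne, List.append_nil,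
        pv_flatMap_congr t (fun k' => (l ++ [x]).filter (fun p => p.1 == k'))
            (fun k' => l.filter (fun p => p.1 == k'))
            (by
              intro k' hk'
              show (l ++ [x]).filter (fun p => p.1 == k') = l.filter (fun p => p.1 == k')
              rw [pv_filter_append_x, if_neg (ne_of_lt (lt_trans hlt (hklt _ hk'))),
                List.append_nil])]
      rfl
    · -- k < x.1 : skip bucket k and recurse
      have hskip : ∀ y ∈ l.filter (fun p => p.1 == k),
          (fun a b : String × String => decide (a.1 < b.1)) x y = false := by
        intro y hy
        have hyk := pv_mem_filter_fst l k y hy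
        show decide (x.1 < y.1) = false
        rw [hyk]
        exact decide_eq_false (not_lt.2 (le_of_lt hgt))
      have hins : PySem.List.insertBy (fun a b : String => decide (a < b)) x.1 (k :: t)
          = k :: PySem.List.insertBy (fun a b : String => decide (a < b)) x.1 t := by
        simp [PySem.List.insertBy, not_lt.2 (le_of_lt hgt)]
      rw [List.flatMap_cons, pv_insertBy_skip _ _ _ _ hskip,
        ih hpw' (fun h => hnm (by simp [h])) hl, hins, List.flatMap_cons,
        pv_filter_append_x l x k, if_neg (by exact ne_of_gt hgt), List.append_nil]

theorem pv_sorted_append_singleton {α κ : Type} [LT κ] [DecidableLT κ]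
    (l : List α) (x : α) (key : α → κ) :
    PySem.List.sorted (l ++ [x]) key false =
      PySem.List.insertBy (fun a b => decide (key a < key b)) x
        (PySem.List.sorted l key false) := by
  rw [PySem.List.sorted_eq_foldl_insertBy, PySem.List.sorted_eq_foldl_insertBy,
    List.foldl_append]
  rfl

theorem pv_grouped (l : List (String × String)) :
    PySem.List.sorted l (fun p => p.1) false =
      (PySem.List.sorted (PySem.Set.ofList (l.map (fun p => p.1))) (fun k => k) false).flatMap
        (fun k => l.filter (fun p => p.1 == k)) := by
  induction l using List.reverseRecOn with
  | nil => rfl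
  | append_singleton l x ih =>
    rw [pv_sorted_append_singleton, ih]
    have hpw : (PySem.List.sorted (PySem.Set.ofList (l.map (fun p => p.1))) (fun k => k) false).Pairwise (· < ·) :=
      PySem.List.sorted_ofList_pairwise_lt _
    have hmap : (l ++ [x]).map (fun p => p.1) = l.map (fun p => p.1) ++ [x.1] := by simp
    by_cases hmem : x.1 ∈ l.map (fun p => p.1)
    · have hadd : PySem.Set.ofList ((l ++ [x]).map (fun p => p.1))
          = PySem.Set.ofList (l.map (fun p => p.1)) := by
        have hc : PySem.Set.contains (PySem.Set.ofList (l.map (fun p => p.1))) x.1 = true := by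
          simp [PySem.Set.contains, (PySem.Set.mem_ofList _ _).2 hmem]
        rw [hmap, PySem.Set.ofList_append_singleton, PySem.Set.add, if_pos hc]
      rw [hadd]
      exact pv_insert_mem x l _ hpw
        (by rw [PySem.List.mem_sorted, PySem.Set.mem_ofList]; exact hmem)
    · have hadd : PySem.Set.ofList ((l ++ [x]).map (fun p => p.1))
          = PySem.Set.ofList (l.map (fun p => p.1)) ++ [x.1] := by
        have hc : PySem.Set.contains (PySem.Set.ofList (l.map (fun p => p.1))) x.1 = false := by
          simp [PySem.Set.contains]
          intro w hw
          exact hmem (List.mem_map.2 ⟨(x.1, w), hw, rfl⟩)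
        rw [hmap, PySem.Set.ofList_append_singleton, PySem.Set.add, if_neg (by rw [hc]; exact Bool.false_ne_true)]
      rw [hadd, pv_sorted_append_singleton]
      rw [pv_insert_notmem x l _ hpw
        (by rw [PySem.List.mem_sorted, PySem.Set.mem_ofList]; exact hmem)
        (by
          rw [List.filter_eq_nil_iff]
          intro p hp hpk
          exact hmem (List.mem_map.2 ⟨p, hp, by simpa using hpk⟩))]

theorem pv_loop (dictionary : List String) :
    ∀ acc : List (String × String),
      dictionary.foldl (fun acc word => acc ++ [(pvKey word, word)]) acc =
        acc ++ dictionary.map (fun word => (pvKey word, word)) := by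
  induction dictionary with
  | nil => intro acc; simp
  | cons w t ih => intro acc; simp [List.foldl_cons, ih]

-- ===== VERDICT (by name: the statement is the Claim_ definition above) =====
theorem make_sorted_dict_spec : Claim_equal_make_sorted_dict := by
  intro dictionary _
  unfold Spec_make_sorted_dict make_sorted_dict make_sorted_dict_alt
  simp only []
  rw [pv_loop dictionary [], List.nil_append, pv_grouped]
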